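-- pv_equiv track=rewrite | github.com/mattaq31/Hash-CAD | crisscross_kit/sec_struc_pred/dot_brac_plotter.py | _strand_terminal_indices
-- ===== SOURCE A (Python) =====
-- def _strand_terminal_indices(sequences):
--     indices = []
--     start = 0
--     for sequence in sequences:
--         end = start + len(sequence) - 1
--         indices.append((start, end))
--         start = end + 1
--     return indices
-- ===== SOURCE B (Python) =====
-- def _strand_terminal_indices(sequences):
--     offsets = [0]
--     for s in sequences:
--         offsets.append(offsets[-1] + len(s))
--     return [(a, b - 1) for a, b in zip(offsets, offsets[1:])]
-- ===== Notes on version B (the rewrite author's own statement) =====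
-- stated objective: alternative
-- what changed: B first builds a prefix-sum boundary table of cumulative lengths, then pairs each boundary with the next minus one, instead of carrying a mutable running start/end through one loop.
import Mathlib
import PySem

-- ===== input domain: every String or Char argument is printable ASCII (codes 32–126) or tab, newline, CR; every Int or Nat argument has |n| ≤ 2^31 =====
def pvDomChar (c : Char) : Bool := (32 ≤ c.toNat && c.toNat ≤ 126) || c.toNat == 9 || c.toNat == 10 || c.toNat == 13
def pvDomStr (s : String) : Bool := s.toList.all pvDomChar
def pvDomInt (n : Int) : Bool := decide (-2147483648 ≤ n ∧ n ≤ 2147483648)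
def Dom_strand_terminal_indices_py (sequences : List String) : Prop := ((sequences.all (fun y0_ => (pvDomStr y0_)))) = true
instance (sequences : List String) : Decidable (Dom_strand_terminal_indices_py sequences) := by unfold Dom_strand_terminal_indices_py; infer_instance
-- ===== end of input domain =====

-- B builds a prefix-sum boundary table first, then pairs adjacent boundaries; same values as A's single running-offset loop.

-- ===== PORT A =====
def strand_terminal_indices_py (sequences : List String) : List (Int × Int) :=
  (sequences.foldl
    (fun (st : List (Int × Int) × Int) sequence =>
      let e : Int := st.2 + PySem.Str.len sequence - 1
      (st.1 ++ [(st.2, e)], e + 1))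
    ([], 0)).1

-- ===== PORT B =====
def strand_terminal_indices_py_alt (sequences : List String) : List (Int × Int) :=
  let offsets : List Int :=
    sequences.foldl (fun acc s => acc ++ [acc.getLast! + PySem.Str.len s]) [0]
  (offsets.zip (offsets.drop 1)).map (fun p => (p.1, p.2 - 1))

-- ===== PRECONDITION & SPEC =====
def Spec_strand_terminal_indices_py (sequences : List String) (out : List (Int × Int)) : Prop := out = strand_terminal_indices_py_alt sequences
instance (sequences : List String) (out : List (Int × Int)) : Decidable (Spec_strand_terminal_indices_py sequences out) := by unfold Spec_strand_terminal_indices_py; infer_instance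

-- ===== CLAIM (what is proved, stated in full; the proofs are below) =====
def Claim_equal_strand_terminal_indices_py : Prop := ∀ (sequences : List String), Dom_strand_terminal_indices_py sequences → Spec_strand_terminal_indices_py sequences (strand_terminal_indices_py sequences)

-- ===== LEMMAS AND PROOFS =====

-- reference pair list: what both ports produce starting from offset t
def pvPairs (t : Int) : List String → List (Int × Int)
  | [] => []
  | s :: ss => (t, t + PySem.Str.len s - 1) :: pvPairs (t + PySem.Str.len s) ss

-- boundary tail: cumulative offsets after t
def pvOffs (t : Int) : List String → List Int
  | [] => []
  | s :: ss => (t + PySem.Str.len s) :: pvOffs (t + PySem.Str.len s) ss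

theorem pvA_foldl (seqs : List String) (acc : List (Int × Int)) (t : Int) :
    (seqs.foldl
      (fun (st : List (Int × Int) × Int) sequence =>
        let e : Int := st.2 + PySem.Str.len sequence - 1
        (st.1 ++ [(st.2, e)], e + 1))
      (acc, t)).1 = acc ++ pvPairs t seqs := by
  induction seqs generalizing acc t with
  | nil => simp [pvPairs]
  | cons s ss ih =>
      simp only [List.foldl_cons, pvPairs]
      rw [show t + PySem.Str.len s - 1 + 1 = t + PySem.Str.len s by ring, ih]
      simp

theorem pvB_foldl (seqs : List String) (init : List Int) (hne : init ≠ []) :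
    seqs.foldl (fun acc s => acc ++ [acc.getLast! + PySem.Str.len s]) init
      = init ++ pvOffs init.getLast! seqs := by
  induction seqs generalizing init with
  | nil => simp [pvOffs]
  | cons s ss ih =>
      simp only [List.foldl_cons, pvOffs]
      rw [ih (init ++ [init.getLast! + PySem.Str.len s]) (by simp)]
      simp [List.getLast!_eq_getLast?_getD]

theorem pvZip_pairs (t : Int) (seqs : List String) :
    ((t :: pvOffs t seqs).zip (pvOffs t seqs)).map (fun p => (p.1, p.2 - 1))
      = pvPairs t seqs := by
  induction seqs generalizing t with
  | nil => simp [pvOffs, pvPairs]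
  | cons s ss ih => simp [pvOffs, pvPairs, ih]

-- ===== VERDICT (by name: the statement is the Claim_ definition above) =====
theorem strand_terminal_indices_py_spec : Claim_equal_strand_terminal_indices_py := by
  intro sequences _
  unfold Spec_strand_terminal_indices_py strand_terminal_indices_py strand_terminal_indices_py_alt
  rw [pvA_foldl, pvB_foldl sequences [0] (by simp)]
  simp only [List.nil_append, List.getLast!_eq_getLast?_getD, List.getLast?_singleton,
    Option.getD_some]
  exact (pvZip_pairs 0 sequences).symm
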